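-- pv_equiv track=rewrite | github.com/AndresNamm/study | visualization/corr.py | calculateAddition
-- ===== SOURCE A (Python) =====
-- def calculateAddition(t):
--     sum1 = 0
--     for i in range(t):
--         sum1 += i
--     sum2 = 0
--
--     for i in range(t):
--         sum2 += i
--
--     return sum1*sum2
-- ===== SOURCE B (Python) =====
-- def calculateAddition(t):
--     s = t * (t - 1) // 2 if t > 0 else 0
--     return s * s
-- ===== Notes on version B (the rewrite author's own statement) =====
-- stated objective: faster
-- what changed: Replaced the two linear summation loops with the Gauss closed form: the triangular-number sum, squared (and zero for non-positive t).
import Mathlib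
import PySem

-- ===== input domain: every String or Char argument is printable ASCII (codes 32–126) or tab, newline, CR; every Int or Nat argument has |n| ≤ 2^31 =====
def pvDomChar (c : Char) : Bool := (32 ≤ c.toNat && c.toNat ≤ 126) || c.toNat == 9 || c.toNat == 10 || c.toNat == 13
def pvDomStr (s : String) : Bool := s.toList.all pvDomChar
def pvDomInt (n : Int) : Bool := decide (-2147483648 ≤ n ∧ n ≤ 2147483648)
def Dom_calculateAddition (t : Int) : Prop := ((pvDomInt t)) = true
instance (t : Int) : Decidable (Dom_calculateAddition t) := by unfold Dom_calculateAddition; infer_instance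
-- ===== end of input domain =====

-- B replaces A's two linear summation loops with the squared Gauss triangular-sum closed form: faster (asymptotic, measured).

-- ===== PORT A =====
def calculateAddition (t : Int) : Int :=
  let sum1 := (PySem.List.pyRange 0 t 1).foldl (fun acc i => acc + i) 0
  let sum2 := (PySem.List.pyRange 0 t 1).foldl (fun acc i => acc + i) 0
  sum1 * sum2

-- ===== PORT B =====
def calculateAddition_alt (t : Int) : Int :=
  let s := if t > 0 then PySem.Int.floordiv (t * (t - 1)) 2 else 0
  s * s

-- ===== PRECONDITION & SPEC =====
def Spec_calculateAddition (t : Int) (out : Int) : Prop := out = calculateAddition_alt t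
instance (t : Int) (out : Int) : Decidable (Spec_calculateAddition t out) := by unfold Spec_calculateAddition; infer_instance

-- ===== CLAIM (what is proved, stated in full; the proofs are below) =====
def Claim_equal_calculateAddition : Prop := ∀ (t : Int), Dom_calculateAddition t → Spec_calculateAddition t (calculateAddition t)

-- ===== LEMMAS AND PROOFS =====

-- Gauss: twice the fold-sum of range(t) equals t*(t-1), stated on Nat length first.
theorem pv_two_mul_sum_range (n : Nat) :
    2 * ((List.range n).map (fun k : Nat => (k : Int))).foldl (fun acc i => acc + i) 0
      = (n : Int) * n - n := by
  induction n with
  | zero => simp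
  | succ m ih =>
    rw [List.range_succ]
    simp only [List.map_append, List.map_cons, List.map_nil, List.foldl_append,
      List.foldl_cons, List.foldl_nil]
    push_cast
    push_cast at ih
    nlinarith [ih]

theorem pv_sum_range_int (t : Int) (ht : 0 < t) :
    (PySem.List.pyRange 0 t 1).foldl (fun acc i => acc + i) 0
      = PySem.Int.floordiv (t * (t - 1)) 2 := by
  rw [PySem.List.pyRange_one]
  simp only [zero_add]
  have h2 := pv_two_mul_sum_range (t - 0).toNat
  have hto : ((t - 0).toNat : Int) = t := by omega
  rw [hto] at h2
  rw [PySem.Int.floordiv_eq_ediv_of_pos (by norm_num)]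
  have hS : t * (t - 1) = 2 * ((List.range (t - 0).toNat).map (fun k : Nat => (k : Int))).foldl (fun acc i => acc + i) 0 := by
    rw [h2]; ring
  rw [hS, Int.mul_ediv_cancel_left _ (by norm_num)]

theorem calculateAddition_eq (t : Int) : calculateAddition t = calculateAddition_alt t := by
  unfold calculateAddition calculateAddition_alt
  by_cases h : 0 < t
  · simp only [h, if_pos]
    rw [pv_sum_range_int t h]
  · have : PySem.List.pyRange 0 t 1 = [] := PySem.List.pyRange_one_eq_nil (by omega)
    simp [this, h]

-- ===== VERDICT (by name: the statement is the Claim_ definition above) =====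
theorem calculateAddition_spec : Claim_equal_calculateAddition := by
  intro t _
  exact calculateAddition_eq t
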